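-- pv_equiv track=rewrite | github.com/tomasbrogueira/Work | IST/fp/lab05/ex03.py | implode
-- ===== SOURCE A (Python) =====
-- def implode(x):
--     if isinstance(x,tuple):
--         num = 0
--         for i in range(len(x)):
--             if isinstance(x[i],int):
--                 num = num*10 + x[i]
--             else:
--                  raise ValueError(":implode: argumento não inteiro")
--         return num
-- ===== SOURCE B (Python) =====
-- def implode(x):
--     if isinstance(x, tuple):
--         total = 0
--         place = 1
--         for d in reversed(x):
--             if isinstance(d, int):
--                 total += d * place
--                 place *= 10
--             else:
--                 raise ValueError(":implode: argumento não inteiro")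
--         return total
-- ===== Notes on version B (the rewrite author's own statement) =====
-- stated objective: alternative
-- what changed: Replaces Horner's left-to-right num*10+digit accumulation over indices with a right-to-left pass that maintains an explicit place-value multiplier and adds digit*place to the total.
import Mathlib
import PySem

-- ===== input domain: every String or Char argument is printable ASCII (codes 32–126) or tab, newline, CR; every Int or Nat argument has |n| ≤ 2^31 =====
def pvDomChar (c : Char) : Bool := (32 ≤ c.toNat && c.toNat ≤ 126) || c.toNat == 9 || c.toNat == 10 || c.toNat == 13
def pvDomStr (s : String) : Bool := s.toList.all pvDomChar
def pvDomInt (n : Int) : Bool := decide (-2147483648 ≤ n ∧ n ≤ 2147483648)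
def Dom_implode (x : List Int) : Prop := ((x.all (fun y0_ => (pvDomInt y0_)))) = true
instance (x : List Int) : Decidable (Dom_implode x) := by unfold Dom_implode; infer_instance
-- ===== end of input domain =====

-- B combines the digit list right-to-left with an explicit place-value multiplier instead of A's
-- Horner accumulation; same cost, proved to return the same value.

-- ===== PORT A =====
-- for i in range(len(x)): num = num*10 + x[i]   (isinstance checks are vacuous on List Int)
def implode (x : List Int) : Int :=
  (PySem.List.pyRange 0 (x.length : Int) 1).foldl
    (fun num i => num * 10 + PySem.List.pyGetD x i 0) 0

-- ===== PORT B =====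
-- for d in reversed(x): total += d * place; place *= 10
def implode_alt (x : List Int) : Int :=
  (x.reverse.foldl (fun (s : Int × Int) d => (s.1 + d * s.2, s.2 * 10)) ((0 : Int), (1 : Int))).1

-- ===== PRECONDITION & SPEC =====
def Spec_implode (x : List Int) (out : Int) : Prop := out = implode_alt x
instance (x : List Int) (out : Int) : Decidable (Spec_implode x out) := by unfold Spec_implode; infer_instance

-- ===== CLAIM (what is proved, stated in full; the proofs are below) =====
def Claim_equal_implode : Prop := ∀ (x : List Int), Dom_implode x → Spec_implode x (implode x)

-- ===== LEMMAS AND PROOFS =====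

-- little-endian value of a digit list
def leVal (xs : List Int) : Int := xs.foldr (fun d acc => d + 10 * acc) 0

theorem leVal_append_singleton (l : List Int) (a : Int) :
    leVal (l ++ [a]) = leVal l + a * 10 ^ l.length := by
  induction l with
  | nil => simp [leVal]
  | cons d l ih =>
      simp [leVal] at ih ⊢
      rw [ih]; ring

theorem horner_foldl (xs : List Int) (n : Int) :
    xs.foldl (fun num d => num * 10 + d) n = n * 10 ^ xs.length + leVal xs.reverse := by
  induction xs generalizing n with
  | nil => simp [leVal]
  | cons a xs ih =>
      simp only [List.foldl_cons, List.reverse_cons, List.length_cons]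
      rw [ih, leVal_append_singleton, List.length_reverse]
      ring

theorem place_foldl (xs : List Int) (t p : Int) :
    (xs.foldl (fun (s : Int × Int) d => (s.1 + d * s.2, s.2 * 10)) (t, p)).1
      = t + p * leVal xs := by
  induction xs generalizing t p with
  | nil => simp [leVal]
  | cons d xs ih =>
      simp only [List.foldl_cons, leVal, List.foldr_cons]
      rw [ih]
      simp only [leVal]
      ring

-- ===== VERDICT (by name: the statement is the Claim_ definition above) =====
theorem implode_spec : Claim_equal_implode := by
  intro x _
  unfold Spec_implode implode implode_alt
  rw [PySem.List.foldl_pyRange_zero_pyGetD' x 0 (fun num d => num * 10 + d) 0,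
      horner_foldl, place_foldl]
  simp
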